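-- pv_equiv track=rewrite | github.com/tomipro/Info-Gral | Practica 5/5.4.py | ultimaPalabra
-- ===== SOURCE A (Python) =====
-- def esLetra(car):
--     return True if ((car>="a" and car<="z") or (car>="A" and car<="Z")) else False
--
-- def ultimaPalabra(texto):
--     i=-1
--     temp=""
--     while i>=(-len(texto)) and not esLetra(texto[i]):
--         i-=1
--     while i>=(-len(texto)) and esLetra(texto[i]):
--         temp=texto[i]+temp
--         i-=1
--     return temp
-- ===== SOURCE B (Python) =====
-- def ultimaPalabra(texto):
--     last = ""
--     cur = ""
--     for c in texto:
--         if ("a" <= c <= "z") or ("A" <= c <= "Z"):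
--             cur = cur + c
--         else:
--             if cur:
--                 last = cur
--             cur = ""
--     return cur if cur else last
-- ===== Notes on version B (the rewrite author's own statement) =====
-- stated objective: faster
-- what changed: B replaces A's backward scan with negative indices (skip non-letters from the end, then build the word by repeated string prepending) by a single forward pass that accumulates the current alphabetic token and remembers the last completed one.
import Mathlib
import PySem

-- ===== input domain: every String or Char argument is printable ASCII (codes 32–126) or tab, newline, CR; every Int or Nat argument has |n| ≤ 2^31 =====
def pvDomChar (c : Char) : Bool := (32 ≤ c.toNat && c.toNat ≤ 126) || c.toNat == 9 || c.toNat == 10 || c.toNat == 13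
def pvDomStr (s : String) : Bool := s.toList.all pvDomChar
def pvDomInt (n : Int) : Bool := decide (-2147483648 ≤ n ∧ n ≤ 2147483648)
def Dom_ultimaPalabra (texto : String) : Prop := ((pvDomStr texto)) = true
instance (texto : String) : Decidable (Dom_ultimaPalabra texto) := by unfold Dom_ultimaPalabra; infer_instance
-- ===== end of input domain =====

-- B replaces A's backward negative-index scan (which rebuilds the word by repeated string prepending) with a single forward pass keeping the current and last completed alphabetic token; a timing run measured B faster.


-- ===== PORT A =====
-- esLetra(car): single-char string comparisons = code-point comparisons on Char (exact)
def esLetra (c : Char) : Bool :=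
  if (('a' ≤ c && c ≤ 'z') || ('A' ≤ c && c ≤ 'Z')) then true else false

-- first while loop: skip non-letters from the end (fuel ≥ number of iterations left)
def uPLoop1 (cs : List Char) : Nat → Int → Int
  | 0, i => i
  | fuel + 1, i =>
    if i ≥ -(cs.length : Int) then
      match PySem.List.pyGet? cs i with
      | some c => if !esLetra c then uPLoop1 cs fuel (i - 1) else i
      | none => i      -- unreachable: the i this port passes is negative and ≥ -len, so pyGet? = some
    else i

-- second while loop: prepend letters while they last
def uPLoop2 (cs : List Char) : Nat → Int → List Char → List Char
  | 0, _, temp => temp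
  | fuel + 1, i, temp =>
    if i ≥ -(cs.length : Int) then
      match PySem.List.pyGet? cs i with
      | some c => if esLetra c then uPLoop2 cs fuel (i - 1) (c :: temp) else temp
      | none => temp   -- unreachable as above
    else temp

def ultimaPalabra (texto : String) : String :=
  String.ofList (uPLoop2 texto.toList (texto.toList.length + 1)
    (uPLoop1 texto.toList (texto.toList.length + 1) (-1)) [])

-- ===== PORT B =====
def uPStep (st : List Char × List Char) (c : Char) : List Char × List Char :=
  if ('a' ≤ c && c ≤ 'z') || ('A' ≤ c && c ≤ 'Z') then (st.1, st.2 ++ [c])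
  else if st.2 ≠ [] then (st.2, []) else (st.1, [])

def ultimaPalabra_alt (texto : String) : String :=
  let st := texto.toList.foldl uPStep ([], [])
  String.ofList (if st.2 ≠ [] then st.2 else st.1)

-- ===== PRECONDITION & SPEC =====
def Spec_ultimaPalabra (texto : String) (out : String) : Prop := out = ultimaPalabra_alt texto
instance (texto : String) (out : String) : Decidable (Spec_ultimaPalabra texto out) := by unfold Spec_ultimaPalabra; infer_instance

-- ===== CLAIM (what is proved, stated in full; the proofs are below) =====
def Claim_equal_ultimaPalabra : Prop := ∀ (texto : String), Dom_ultimaPalabra texto → Spec_ultimaPalabra texto (ultimaPalabra texto)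

-- ===== LEMMAS AND PROOFS =====

-- the value both programs compute: the last maximal run of letters, as a list
def lastWord (cs : List Char) : List Char :=
  ((cs.reverse.dropWhile (fun c => !esLetra c)).takeWhile esLetra).reverse

theorem uPLoop1_succ (cs : List Char) (f : Nat) (i : Int) :
    uPLoop1 cs (f + 1) i =
      if i ≥ -(cs.length : Int) then
        match PySem.List.pyGet? cs i with
        | some c => if !esLetra c then uPLoop1 cs f (i - 1) else i
        | none => i
      else i := rfl

theorem uPLoop2_succ (cs : List Char) (f : Nat) (i : Int) (temp : List Char) :
    uPLoop2 cs (f + 1) i temp =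
      if i ≥ -(cs.length : Int) then
        match PySem.List.pyGet? cs i with
        | some c => if esLetra c then uPLoop2 cs f (i - 1) (c :: temp) else temp
        | none => temp
      else temp := rfl

theorem pyGet_from_drop (cs : List Char) (k : Nat) (c : Char) (rs' : List Char)
    (h : cs.reverse.drop k = c :: rs') (hk : k < cs.length) :
    PySem.List.pyGet? cs (-((k : Int) + 1)) = some c := by
  have hget : cs.reverse[k]? = some c := by
    have h' := congrArg List.head? h
    simpa [List.head?_drop] using h'
  have h1 : PySem.List.pyGet? cs (-(((k + 1 : Nat)) : Int)) = cs[cs.length - (k + 1)]? :=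
    PySem.List.pyGet?_neg_natCast cs (k + 1) (by omega) (by omega)
  have h2 : cs.reverse[k]? = cs[cs.length - 1 - k]? := List.getElem?_reverse (by simpa using hk)
  have h3 : cs.length - (k + 1) = cs.length - 1 - k := by omega
  have h4 : PySem.List.pyGet? cs (-(((k + 1 : Nat)) : Int)) = some c := by
    rw [h1, h3, ← h2, hget]
  rw [show (-((k : Int) + 1)) = (-(((k + 1 : Nat)) : Int)) by push_cast; ring]
  exact h4

theorem drop_reverse_tail (cs : List Char) (k : Nat) (c : Char) (rs' : List Char)
    (h : cs.reverse.drop k = c :: rs') : cs.reverse.drop (k + 1) = rs' := by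
  rw [← List.tail_drop, h]
  rfl

theorem uPLoop1_step_some (cs : List Char) (f : Nat) (i : Int) (c : Char)
    (hge : i ≥ -(cs.length : Int)) (hpg : PySem.List.pyGet? cs i = some c) :
    uPLoop1 cs (f + 1) i = if !esLetra c then uPLoop1 cs f (i - 1) else i := by
  rw [uPLoop1_succ, if_pos hge, hpg]

theorem uPLoop2_step_some (cs : List Char) (f : Nat) (i : Int) (c : Char) (temp : List Char)
    (hge : i ≥ -(cs.length : Int)) (hpg : PySem.List.pyGet? cs i = some c) :
    uPLoop2 cs (f + 1) i temp = if esLetra c then uPLoop2 cs f (i - 1) (c :: temp) else temp := by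
  rw [uPLoop2_succ, if_pos hge, hpg]

theorem uPLoop1_eq (rs : List Char) : ∀ (cs : List Char) (k fuel : Nat),
    cs.reverse.drop k = rs → cs.length ≤ fuel + k →
    uPLoop1 cs fuel (-((k : Int) + 1)) =
      -(((k + (rs.takeWhile (fun c => !esLetra c)).length : Nat) : Int) + 1) := by
  induction rs with
  | nil =>
    intro cs k fuel h hf
    have hlen : cs.length ≤ k := by
      have := congrArg List.length h
      simp [List.length_drop] at this
      omega
    have hne : ¬ ((-((k : Int) + 1)) ≥ -(cs.length : Int)) := by push_cast; omega
    cases fuel with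
    | zero => simp [uPLoop1]
    | succ f => rw [uPLoop1_succ, if_neg hne]; simp
  | cons c rs' ih =>
    intro cs k fuel h hf
    have hk : k < cs.length := by
      have := congrArg List.length h
      simp [List.length_drop] at this
      omega
    have hpg := pyGet_from_drop cs k c rs' h hk
    have hge : (-((k : Int) + 1)) ≥ -(cs.length : Int) := by push_cast; omega
    cases fuel with
    | zero => omega
    | succ f =>
      rw [uPLoop1_step_some cs f _ c hge hpg]
      by_cases hl : esLetra c
      · rw [if_neg (by simp [hl])]
        simp [hl, List.takeWhile_cons]
      · have hstep : (-((k : Int) + 1)) - 1 = -(((k + 1 : Nat) : Int) + 1) := by push_cast; ring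
        have hih := ih cs (k + 1) f (drop_reverse_tail cs k c rs' h) (by omega)
        simp only [Bool.not_eq_true] at hl
        rw [if_pos (show (!esLetra c) = true by simp [hl])]
        rw [hstep, hih]
        have hlen2 : (List.takeWhile (fun c => !esLetra c) (c :: rs')).length
            = (List.takeWhile (fun c => !esLetra c) rs').length + 1 := by
          simp [List.takeWhile_cons, hl]
        rw [hlen2]
        push_cast
        ring
  
theorem uPLoop2_eq (rs : List Char) : ∀ (cs : List Char) (k fuel : Nat) (temp : List Char),
    cs.reverse.drop k = rs → cs.length ≤ fuel + k →
    uPLoop2 cs fuel (-((k : Int) + 1)) temp = (rs.takeWhile esLetra).reverse ++ temp := by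
  induction rs with
  | nil =>
    intro cs k fuel temp h hf
    have hlen : cs.length ≤ k := by
      have := congrArg List.length h
      simp [List.length_drop] at this
      omega
    have hne : ¬ ((-((k : Int) + 1)) ≥ -(cs.length : Int)) := by push_cast; omega
    cases fuel with
    | zero => simp [uPLoop2]
    | succ f => rw [uPLoop2_succ, if_neg hne]; simp
  | cons c rs' ih =>
    intro cs k fuel temp h hf
    have hk : k < cs.length := by
      have := congrArg List.length h
      simp [List.length_drop] at this
      omega
    have hpg := pyGet_from_drop cs k c rs' h hk
    have hge : (-((k : Int) + 1)) ≥ -(cs.length : Int) := by push_cast; omega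
    cases fuel with
    | zero => omega
    | succ f =>
      rw [uPLoop2_step_some cs f _ c temp hge hpg]
      by_cases hl : esLetra c
      · have hstep : (-((k : Int) + 1)) - 1 = -(((k + 1 : Nat) : Int) + 1) := by push_cast; ring
        have hih := ih cs (k + 1) f (c :: temp) (drop_reverse_tail cs k c rs' h) (by omega)
        rw [if_pos hl, hstep, hih]
        simp [List.takeWhile_cons, hl]
      · simp only [Bool.not_eq_true] at hl
        rw [if_neg (by simp [hl])]
        simp [List.takeWhile_cons, hl]
  
theorem dropWhile_eq_drop_len (p : Char → Bool) (l : List Char) :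
    l.dropWhile p = l.drop (l.takeWhile p).length := by
  induction l with
  | nil => simp
  | cons c l ih =>
    by_cases h : p c
    · simp [List.dropWhile_cons, List.takeWhile_cons, h, ih]
    · simp [List.dropWhile_cons, List.takeWhile_cons, h]

theorem ultimaPalabra_eq_lastWord (texto : String) :
    ultimaPalabra texto = String.ofList (lastWord texto.toList) := by
  unfold ultimaPalabra
  have h1 : uPLoop1 texto.toList (texto.toList.length + 1) (-1) =
      -(((0 + (texto.toList.reverse.takeWhile (fun c => !esLetra c)).length : Nat) : Int) + 1) := by
    have := uPLoop1_eq texto.toList.reverse texto.toList 0 (texto.toList.length + 1) (by simp) (by omega)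
    simpa using this
  rw [h1]
  have hklen : (texto.toList.reverse.takeWhile (fun c => !esLetra c)).length ≤ texto.toList.length := by
    have := (List.takeWhile_sublist (p := fun c => !esLetra c) (l := texto.toList.reverse)).length_le
    simpa using this
  have h2 := uPLoop2_eq (texto.toList.reverse.dropWhile (fun c => !esLetra c)) texto.toList
      (texto.toList.reverse.takeWhile (fun c => !esLetra c)).length (texto.toList.length + 1) []
      (by rw [← dropWhile_eq_drop_len]) (by omega)
  rw [show ((0 + (texto.toList.reverse.takeWhile (fun c => !esLetra c)).length : Nat) : Int)
      = (((texto.toList.reverse.takeWhile (fun c => !esLetra c)).length : Nat) : Int) by push_cast; ring]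
  rw [h2]
  simp [lastWord]

theorem uPStep_eq (st : List Char × List Char) (c : Char) :
    uPStep st c =
      if ('a' ≤ c && c ≤ 'z') || ('A' ≤ c && c ≤ 'Z') then (st.1, st.2 ++ [c])
      else if st.2 ≠ [] then (st.2, []) else (st.1, []) := rfl

theorem foldB_inv (cs : List Char) :
    (cs.foldl uPStep ([], [])).2 = (cs.reverse.takeWhile esLetra).reverse ∧
    (if (cs.foldl uPStep ([], [])).2 ≠ [] then (cs.foldl uPStep ([], [])).2
     else (cs.foldl uPStep ([], [])).1) = lastWord cs := by
  induction cs using List.reverseRecOn with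
  | nil => simp [lastWord]
  | append_singleton xs c ih =>
    obtain ⟨hcur, hres⟩ := ih
    have hfold : ((xs ++ [c]).foldl uPStep ([], [])) = uPStep (xs.foldl uPStep ([], [])) c := by
      simp [List.foldl_append]
    by_cases hl : esLetra c
    · have hl' : (('a' ≤ c && c ≤ 'z') || ('A' ≤ c && c ≤ 'Z')) = true := by
        simpa [esLetra] using hl
      have hc2 : ((xs ++ [c]).foldl uPStep ([], [])).2
          = ((xs ++ [c]).reverse.takeWhile esLetra).reverse := by
        rw [hfold, uPStep_eq, if_pos hl']
        simp [hcur, List.takeWhile_cons, hl]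
      refine ⟨hc2, ?_⟩
      rw [hc2]
      have hne : ((xs ++ [c]).reverse.takeWhile esLetra).reverse ≠ [] := by
        simp [List.takeWhile_cons, hl]
      rw [if_pos hne]
      simp [lastWord, List.dropWhile_cons, hl]
    · have hl' : (('a' ≤ c && c ≤ 'z') || ('A' ≤ c && c ≤ 'Z')) = false := by
        simpa [esLetra] using hl
      simp only [Bool.not_eq_true] at hl
      have hLW : lastWord (xs ++ [c]) = lastWord xs := by
        simp [lastWord, List.dropWhile_cons, hl]
      have hc2 : ((xs ++ [c]).foldl uPStep ([], [])).2 = [] := by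
        rw [hfold, uPStep_eq, hl', if_neg (by simp)]
        split <;> rfl
      refine ⟨by rw [hc2]; simp [List.takeWhile_cons, hl], ?_⟩
      rw [hc2, if_neg (by simp), hLW, hfold, uPStep_eq, hl', if_neg (by simp)]
      by_cases hcne : (xs.foldl uPStep ([], [])).2 = []
      · rw [if_neg (by simp [hcne])]
        rw [if_neg (by simp [hcne])] at hres
        simpa using hres
      · rw [if_pos hcne]
        rw [if_pos hcne] at hres
        simpa using hres

theorem ultimaPalabra_alt_eq_lastWord (texto : String) :
    ultimaPalabra_alt texto = String.ofList (lastWord texto.toList) := by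
  unfold ultimaPalabra_alt
  obtain ⟨_, hres⟩ := foldB_inv texto.toList
  simp only
  rw [hres]

-- ===== VERDICT (by name: the statement is the Claim_ definition above) =====
theorem ultimaPalabra_spec : Claim_equal_ultimaPalabra := by
  intro texto _
  unfold Spec_ultimaPalabra
  rw [ultimaPalabra_eq_lastWord, ultimaPalabra_alt_eq_lastWord]
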